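-- pv_equiv track=rewrite | github.com/mirojasm/Calculus-App | research/splitting/cidi/module2_feasibility.py | close_under_prerequisites
-- ===== SOURCE A (Python) =====
-- CELL_ORDER = ["A1","A2","A3","B1","B2","B3","C1","C2","C3","D1","D2","D3"]
--
-- PREREQ_DAG: dict[str, list[str]] = {
--     "A1": [],
--     "A2": ["A1"],
--     "A3": ["A1", "A2"],
--     "B1": ["A1"],
--     "B2": ["A2", "B1"],
--     "B3": ["A3", "B2"],
--     "C1": ["B1", "B2"],
--     "C2": ["C1", "B2"],
--     "C3": ["B3"],
--     "D1": ["C1", "A1"],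
--     "D2": ["C2", "D1"],
--     "D3": ["D2", "B3"],
-- }
--
-- def close_under_prerequisites(target_cells: list[str]) -> list[str]:
--     """
--     Complete target into the minimal upset of the DAG that contains it.
--     Returns sorted list (CELL_ORDER order).
--     """
--     closed: set[str] = set(target_cells)
--     changed = True
--     while changed:
--         changed = False
--         for cell in list(closed):
--             for prereq in PREREQ_DAG.get(cell, []):
--                 if prereq not in closed:
--                     closed.add(prereq)
--                     changed = True
--     return [c for c in CELL_ORDER if c in closed]
-- ===== SOURCE B (Python) =====
-- CELL_ORDER = ["A1","A2","A3","B1","B2","B3","C1","C2","C3","D1","D2","D3"]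
--
-- PREREQ_DAG: dict[str, list[str]] = {
--     "A1": [],
--     "A2": ["A1"],
--     "A3": ["A1", "A2"],
--     "B1": ["A1"],
--     "B2": ["A2", "B1"],
--     "B3": ["A3", "B2"],
--     "C1": ["B1", "B2"],
--     "C2": ["C1", "B2"],
--     "C3": ["B3"],
--     "D1": ["C1", "A1"],
--     "D2": ["C2", "D1"],
--     "D3": ["D2", "B3"],
-- }
--
-- def close_under_prerequisites(target_cells: list[str]) -> list[str]:
--     """
--     Complete target into the minimal upset of the DAG that contains it.
--     Returns sorted list (CELL_ORDER order).
--     """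
--     # One DP pass over CELL_ORDER (a topological order of PREREQ_DAG):
--     # anc[c] = full prerequisite closure of c, built from earlier entries.
--     anc: dict[str, set[str]] = {}
--     for c in CELL_ORDER:
--         s = {c}
--         for p in PREREQ_DAG[c]:
--             s |= anc[p]
--         anc[c] = s
--     closed: set[str] = set()
--     for t in target_cells:
--         closed |= anc.get(t, {t})
--     return [c for c in CELL_ORDER if c in closed]
-- ===== Notes on version B (the rewrite author's own statement) =====
-- stated objective: alternative
-- what changed: Replaced the while-changed fixed-point rescan of the whole set by a single dynamic-programming pass over CELL_ORDER (a topological order of PREREQ_DAG) that precomputes each cell's full ancestor closure, then unions the closures of the targets.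
import Mathlib
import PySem

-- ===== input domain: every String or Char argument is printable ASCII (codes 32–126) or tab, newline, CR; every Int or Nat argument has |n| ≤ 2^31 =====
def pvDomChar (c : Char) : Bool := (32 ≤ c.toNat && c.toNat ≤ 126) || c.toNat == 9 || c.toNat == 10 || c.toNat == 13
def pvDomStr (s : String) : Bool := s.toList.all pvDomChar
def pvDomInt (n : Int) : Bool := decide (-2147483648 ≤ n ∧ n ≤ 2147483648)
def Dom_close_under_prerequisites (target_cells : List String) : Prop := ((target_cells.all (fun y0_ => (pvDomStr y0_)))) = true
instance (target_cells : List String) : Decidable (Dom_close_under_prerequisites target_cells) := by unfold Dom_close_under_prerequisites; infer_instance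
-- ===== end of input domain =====

-- B replaces A's while-changed fixed-point rescan with one DP pass over CELL_ORDER (a
-- topological order of PREREQ_DAG) precomputing each cell's ancestor closure; same result.

def CELL_ORDER : List String :=
  ["A1","A2","A3","B1","B2","B3","C1","C2","C3","D1","D2","D3"]

def PREREQ_DAG : PySem.Dict String (List String) :=
  PySem.Dict.ofList [("A1",[]),("A2",["A1"]),("A3",["A1","A2"]),("B1",["A1"]),
    ("B2",["A2","B1"]),("B3",["A3","B2"]),("C1",["B1","B2"]),("C2",["C1","B2"]),
    ("C3",["B3"]),("D1",["C1","A1"]),("D2",["C2","D1"]),("D3",["D2","B3"])]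

-- ===== PORT A =====
-- inner loop body: `if prereq not in closed: closed.add(prereq); changed = True`
def pvStep (st : PySem.Set String × Bool) (p : String) : PySem.Set String × Bool :=
  if PySem.Set.contains st.1 p then st else (PySem.Set.add st.1 p, true)

-- `for prereq in PREREQ_DAG.get(cell, []): ...`
def pvPassCell (st : PySem.Set String × Bool) (cell : String) : PySem.Set String × Bool :=
  (PySem.Dict.getD PREREQ_DAG cell []).foldl pvStep st

-- one `for cell in list(closed)` pass over the snapshot, carrying (closed, changed)
def pvPass (s : PySem.Set String) : PySem.Set String × Bool :=
  s.foldl pvPassCell (s, false)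

-- `while changed:` — fuel 13 always reaches the fixpoint: each productive pass adds at
-- least one of the 12 DAG cells (lemma pvLoop_closed below proves 13 passes suffice);
-- Python's hash iteration order over the set is irrelevant: only final membership is used.
def pvLoop : Nat → PySem.Set String → PySem.Set String
  | 0, s => s
  | f+1, s => let r := pvPass s; if r.2 then pvLoop f r.1 else r.1

def close_under_prerequisites (target_cells : List String) : List String :=
  CELL_ORDER.filter (fun c => PySem.Set.contains (pvLoop 13 (PySem.Set.ofList target_cells)) c)

-- ===== PORT B =====
-- `anc[c] = {c} | anc[p1] | ...` built over CELL_ORDER; `anc[p]`/`PREREQ_DAG[c]` are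
-- ported as getD with a default that is never used (every key looked up is present,
-- because each cell's prereqs precede it in CELL_ORDER).
def pvAnc : PySem.Dict String (PySem.Set String) :=
  CELL_ORDER.foldl (fun d c =>
    PySem.Dict.insert d c
      ((PySem.Dict.getD PREREQ_DAG c []).foldl
        (fun s p => PySem.Set.union s (PySem.Dict.getD d p PySem.Set.empty))
        (PySem.Set.ofList [c]))) PySem.Dict.empty

-- `anc.get(t, {t})`
def pvAncOf (t : String) : PySem.Set String :=
  PySem.Dict.getD pvAnc t (PySem.Set.ofList [t])

def close_under_prerequisites_alt (target_cells : List String) : List String :=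
  let closed := target_cells.foldl (fun acc t => PySem.Set.union acc (pvAncOf t)) PySem.Set.empty
  CELL_ORDER.filter (fun c => PySem.Set.contains closed c)

-- ===== PRECONDITION & SPEC =====
def Spec_close_under_prerequisites (target_cells : List String) (out : List String) : Prop := out = close_under_prerequisites_alt target_cells
instance (target_cells : List String) (out : List String) : Decidable (Spec_close_under_prerequisites target_cells out) := by unfold Spec_close_under_prerequisites; infer_instance

-- ===== CLAIM (what is proved, stated in full; the proofs are below) =====
def Claim_equal_close_under_prerequisites : Prop := ∀ (target_cells : List String), Dom_close_under_prerequisites target_cells → Spec_close_under_prerequisites target_cells (close_under_prerequisites target_cells)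

-- ===== LEMMAS AND PROOFS =====

-- prereq list of a cell (A's `PREREQ_DAG.get(cell, [])`)
def pvPre (c : String) : List String := PySem.Dict.getD PREREQ_DAG c []

-- a set closed under taking prerequisites
def pvClosedS (S : List String) : Prop := ∀ c ∈ S, ∀ p ∈ pvPre c, p ∈ S

-- unknown keys look up the default
theorem pvPre_of_not_mem (t : String) (h : t ∉ CELL_ORDER) : pvPre t = [] := by
  simp [CELL_ORDER] at h
  obtain ⟨h1,h2,h3,h4,h5,h6,h7,h8,h9,h10,h11,h12⟩ := h
  have e : PREREQ_DAG = PySem.Dict.mk [("A1",[]),("A2",["A1"]),("A3",["A1","A2"]),("B1",["A1"]),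
    ("B2",["A2","B1"]),("B3",["A3","B2"]),("C1",["B1","B2"]),("C2",["C1","B2"]),
    ("C3",["B3"]),("D1",["C1","A1"]),("D2",["C2","D1"]),("D3",["D2","B3"])] := by rfl
  rw [pvPre, e, PySem.Dict.getD_eq_get?_getD]
  simp [PySem.Dict.get?_mk_cons, Ne.symm h1, Ne.symm h2, Ne.symm h3, Ne.symm h4, Ne.symm h5,
    Ne.symm h6, Ne.symm h7, Ne.symm h8, Ne.symm h9, Ne.symm h10, Ne.symm h11, Ne.symm h12]
  rfl

theorem pvAncOf_of_not_mem (t : String) (h : t ∉ CELL_ORDER) : pvAncOf t = [t] := by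
  simp [CELL_ORDER] at h
  obtain ⟨h1,h2,h3,h4,h5,h6,h7,h8,h9,h10,h11,h12⟩ := h
  have e : pvAnc = PySem.Dict.mk [("A1", ["A1"]), ("A2", ["A2", "A1"]), ("A3", ["A3", "A1", "A2"]),
    ("B1", ["B1", "A1"]), ("B2", ["B2", "A2", "A1", "B1"]), ("B3", ["B3", "A3", "A1", "A2", "B2", "B1"]),
    ("C1", ["C1", "B1", "A1", "B2", "A2"]), ("C2", ["C2", "C1", "B1", "A1", "B2", "A2"]),
    ("C3", ["C3", "B3", "A3", "A1", "A2", "B2", "B1"]), ("D1", ["D1", "C1", "B1", "A1", "B2", "A2"]),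
    ("D2", ["D2", "C2", "C1", "B1", "A1", "B2", "A2", "D1"]),
    ("D3", ["D3", "D2", "C2", "C1", "B1", "A1", "B2", "A2", "D1", "B3", "A3"])] := by rfl
  rw [pvAncOf, e, PySem.Dict.getD_eq_get?_getD]
  simp [PySem.Dict.get?_mk_cons, Ne.symm h1, Ne.symm h2, Ne.symm h3, Ne.symm h4, Ne.symm h5,
    Ne.symm h6, Ne.symm h7, Ne.symm h8, Ne.symm h9, Ne.symm h10, Ne.symm h11, Ne.symm h12, PySem.Set.ofList]
  rfl

-- decidable facts about the fixed tables
theorem pvAnc_self : ∀ t ∈ CELL_ORDER, t ∈ pvAncOf t := by decide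

theorem pvAnc_closed : ∀ t ∈ CELL_ORDER, ∀ x ∈ pvAncOf t, ∀ p ∈ pvPre x, p ∈ pvAncOf t := by decide

theorem pvPre_sub_cells' : ∀ c ∈ CELL_ORDER, ∀ p ∈ pvPre c, p ∈ CELL_ORDER := by decide

theorem pvPre_sub_cells (c : String) : ∀ p ∈ pvPre c, p ∈ CELL_ORDER := by
  by_cases h : c ∈ CELL_ORDER
  · exact pvPre_sub_cells' c h
  · simp [pvPre_of_not_mem c h]

theorem pvAncOf_self (t : String) : t ∈ pvAncOf t := by
  by_cases h : t ∈ CELL_ORDER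
  · exact pvAnc_self t h
  · simp [pvAncOf_of_not_mem t h]

-- the target invariant: membership in some target's ancestor closure
theorem pvQ_closed (tg : List String) (x : String) (hx : ∃ t ∈ tg, x ∈ pvAncOf t)
    (p : String) (hp : p ∈ pvPre x) : ∃ t ∈ tg, p ∈ pvAncOf t := by
  obtain ⟨t, ht, hxt⟩ := hx
  by_cases hc : t ∈ CELL_ORDER
  · exact ⟨t, ht, pvAnc_closed t hc x hxt p hp⟩
  · rw [pvAncOf_of_not_mem t hc] at hxt
    simp at hxt
    subst hxt
    rw [pvPre_of_not_mem x hc] at hp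
    simp at hp

-- ---- inner fold (over one prereq list) ----
theorem pvInner_mono (l : List String) (st : PySem.Set String × Bool) (x : String)
    (h : x ∈ st.1) : x ∈ (l.foldl pvStep st).1 := by
  induction l generalizing st with
  | nil => exact h
  | cons p l ih =>
    simp only [List.foldl_cons]
    apply ih
    unfold pvStep
    split
    · exact h
    · exact (PySem.Set.mem_add _ _ _).mpr (Or.inl h)

theorem pvInner_sound (l : List String) (st : PySem.Set String × Bool) (x : String)
    (h : x ∈ (l.foldl pvStep st).1) : x ∈ st.1 ∨ x ∈ l := by
  induction l generalizing st with
  | nil => exact Or.inl h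
  | cons p l ih =>
    simp only [List.foldl_cons] at h
    rcases ih _ h with h' | h'
    · unfold pvStep at h'
      split at h'
      · exact Or.inl h'
      · rcases (PySem.Set.mem_add _ _ _).mp h' with h'' | h''
        · exact Or.inl h''
        · exact Or.inr (by simp [h''])
    · exact Or.inr (List.mem_cons_of_mem _ h')

theorem pvInner_snd_mono (l : List String) (st : PySem.Set String × Bool)
    (h : st.2 = true) : (l.foldl pvStep st).2 = true := by
  induction l generalizing st with
  | nil => exact h
  | cons p l ih =>
    simp only [List.foldl_cons]
    apply ih
    unfold pvStep
    split
    · exact h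
    · rfl

theorem pvInner_false (l : List String) (st : PySem.Set String × Bool)
    (h : (l.foldl pvStep st).2 = false) : l.foldl pvStep st = st ∧ ∀ p ∈ l, p ∈ st.1 := by
  induction l generalizing st with
  | nil => exact ⟨rfl, by simp⟩
  | cons p l ih =>
    simp only [List.foldl_cons] at h ⊢
    by_cases hc : PySem.Set.contains st.1 p = true
    · have e : pvStep st p = st := by unfold pvStep; rw [if_pos hc]
      rw [e] at h ⊢
      obtain ⟨e1, e2⟩ := ih _ h
      exact ⟨e1, by
        intro q hq
        rcases List.mem_cons.mp hq with h' | h'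
        · exact h' ▸ (PySem.Set.contains_iff _ _).mp hc
        · exact e2 q h'⟩
    · exfalso
      have e : pvStep st p = (PySem.Set.add st.1 p, true) := by unfold pvStep; rw [if_neg hc]
      rw [e] at h
      rw [pvInner_snd_mono l _ rfl] at h
      exact Bool.true_eq_false.mp h

theorem pvInner_new (l : List String) (st : PySem.Set String × Bool)
    (h0 : st.2 = false) (h : (l.foldl pvStep st).2 = true) :
    ∃ u ∈ l, u ∈ (l.foldl pvStep st).1 ∧ u ∉ st.1 := by
  induction l generalizing st with
  | nil => simp [h0] at h
  | cons p l ih =>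
    simp only [List.foldl_cons] at h ⊢
    by_cases hc : PySem.Set.contains st.1 p = true
    · have e : pvStep st p = st := by unfold pvStep; rw [if_pos hc]
      rw [e] at h ⊢
      obtain ⟨u, hu, hu1, hu2⟩ := ih _ h0 h
      exact ⟨u, List.mem_cons_of_mem _ hu, hu1, hu2⟩
    · have e : pvStep st p = (PySem.Set.add st.1 p, true) := by unfold pvStep; rw [if_neg hc]
      rw [e]
      refine ⟨p, List.mem_cons_self, ?_, ?_⟩
      · exact pvInner_mono _ _ _ ((PySem.Set.mem_add _ _ _).mpr (Or.inr rfl))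
      · intro hmem
        exact hc ((PySem.Set.contains_iff _ _).mpr hmem)

-- ---- outer fold (over the snapshot of the closed set) ----
theorem pvOuter_mono (l : List String) (st : PySem.Set String × Bool) (x : String)
    (h : x ∈ st.1) : x ∈ (l.foldl pvPassCell st).1 := by
  induction l generalizing st with
  | nil => exact h
  | cons c l ih => exact ih _ (pvInner_mono _ _ _ h)

theorem pvOuter_sound (l : List String) (st : PySem.Set String × Bool) (x : String)
    (h : x ∈ (l.foldl pvPassCell st).1) : x ∈ st.1 ∨ ∃ c ∈ l, x ∈ pvPre c := by
  induction l generalizing st with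
  | nil => exact Or.inl h
  | cons c l ih =>
    simp only [List.foldl_cons] at h
    rcases ih _ h with h' | ⟨c', hc', hx'⟩
    · rcases pvInner_sound _ _ _ h' with h'' | h''
      · exact Or.inl h''
      · exact Or.inr ⟨c, List.mem_cons_self, h''⟩
    · exact Or.inr ⟨c', List.mem_cons_of_mem _ hc', hx'⟩

theorem pvOuter_snd_mono (l : List String) (st : PySem.Set String × Bool)
    (h : st.2 = true) : (l.foldl pvPassCell st).2 = true := by
  induction l generalizing st with
  | nil => exact h
  | cons c l ih => exact ih _ (pvInner_snd_mono _ _ h)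

theorem pvOuter_false (l : List String) (st : PySem.Set String × Bool)
    (h : (l.foldl pvPassCell st).2 = false) :
    l.foldl pvPassCell st = st ∧ ∀ c ∈ l, ∀ p ∈ pvPre c, p ∈ st.1 := by
  induction l generalizing st with
  | nil => exact ⟨rfl, by simp⟩
  | cons c l ih =>
    simp only [List.foldl_cons] at h ⊢
    have hsnd : (pvPassCell st c).2 = false := by
      by_contra hne
      rw [pvOuter_snd_mono l _ (Bool.of_not_eq_false hne)] at h
      exact Bool.true_eq_false.mp h
    obtain ⟨e1, e2⟩ := pvInner_false _ _ hsnd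
    rw [show pvPassCell st c = st from e1] at h ⊢
    obtain ⟨f1, f2⟩ := ih _ h
    refine ⟨f1, ?_⟩
    intro c' hc'
    rcases List.mem_cons.mp hc' with h' | h'
    · exact h' ▸ e2
    · exact f2 c' h'

theorem pvOuter_new (l : List String) (st : PySem.Set String × Bool)
    (h0 : st.2 = false) (h : (l.foldl pvPassCell st).2 = true) :
    ∃ u, u ∈ (l.foldl pvPassCell st).1 ∧ u ∉ st.1 ∧ u ∈ CELL_ORDER := by
  induction l generalizing st with
  | nil => simp [h0] at h
  | cons c l ih =>
    simp only [List.foldl_cons] at h ⊢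
    by_cases hsnd : (pvPassCell st c).2 = false
    · obtain ⟨e1, _⟩ := pvInner_false _ _ hsnd
      rw [show pvPassCell st c = st from e1] at h ⊢
      exact ih _ h0 h
    · have hsnd' : (pvPassCell st c).2 = true := Bool.of_not_eq_false hsnd
      obtain ⟨u, hul, hu1, hu2⟩ := pvInner_new _ _ h0 hsnd'
      exact ⟨u, pvOuter_mono _ _ _ hu1, hu2, pvPre_sub_cells c u hul⟩

-- ---- one pass ----
theorem pvPass_mono (s : PySem.Set String) (x : String) (h : x ∈ s) : x ∈ (pvPass s).1 :=
  pvOuter_mono s (s, false) x h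

theorem pvPass_sound (s : PySem.Set String) (x : String) (h : x ∈ (pvPass s).1) :
    x ∈ s ∨ ∃ c ∈ s, x ∈ pvPre c := pvOuter_sound s (s, false) x h

theorem pvPass_false (s : PySem.Set String) (h : (pvPass s).2 = false) :
    (pvPass s).1 = s ∧ pvClosedS s := by
  obtain ⟨e1, e2⟩ := pvOuter_false s (s, false) h
  exact ⟨by rw [pvPass, e1], e2⟩

theorem pvPass_new (s : PySem.Set String) (h : (pvPass s).2 = true) :
    ∃ u, u ∈ (pvPass s).1 ∧ u ∉ s ∧ u ∈ CELL_ORDER :=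
  pvOuter_new s (s, false) rfl h

-- ---- the while loop ----
theorem pvLoop_mono (f : Nat) (s : PySem.Set String) (x : String) (h : x ∈ s) :
    x ∈ pvLoop f s := by
  induction f generalizing s with
  | zero => exact h
  | succ f ih =>
    simp only [pvLoop]
    split
    · exact ih _ (pvPass_mono _ _ h)
    · exact pvPass_mono _ _ h

theorem pvLoop_sound (P : String → Prop) (hP : ∀ c, P c → ∀ p ∈ pvPre c, P p)
    (f : Nat) (s : PySem.Set String) (hs : ∀ x ∈ s, P x) :
    ∀ x ∈ pvLoop f s, P x := by
  induction f generalizing s with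
  | zero => exact hs
  | succ f ih =>
    have hpass : ∀ x ∈ (pvPass s).1, P x := by
      intro x hx
      rcases pvPass_sound s x hx with h | ⟨c, hc, hx'⟩
      · exact hs x h
      · exact hP c (hs c hc) x hx'
    simp only [pvLoop]
    split
    · exact ih _ hpass
    · exact hpass

-- cells still missing from the closed set
def pvMiss (s : PySem.Set String) : Nat :=
  (CELL_ORDER.filter (fun c => !(PySem.Set.contains s c))).length

theorem pvMiss_lt (s : PySem.Set String) (h : (pvPass s).2 = true) :
    pvMiss (pvPass s).1 < pvMiss s := by
  obtain ⟨u, hu1, hu2, hu3⟩ := pvPass_new s h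
  have hsub : List.Sublist (CELL_ORDER.filter (fun c => !(PySem.Set.contains (pvPass s).1 c)))
      (CELL_ORDER.filter (fun c => !(PySem.Set.contains s c))) := by
    apply List.monotone_filter_right
    intro a ha
    simp only [Bool.not_eq_eq_eq_not, Bool.not_true] at ha ⊢
    by_contra hc
    have : a ∈ s := (PySem.Set.contains_iff _ _).mp (Bool.of_not_eq_false hc)
    have : a ∈ (pvPass s).1 := pvPass_mono _ _ this
    rw [(PySem.Set.contains_iff _ _).mpr this] at ha
    exact Bool.true_eq_false.mp ha
  rcases hsub.length_le.lt_or_eq with hlt | heq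
  · exact hlt
  · exfalso
    have heqlist := hsub.eq_of_length heq
    have humem : u ∈ CELL_ORDER.filter (fun c => !(PySem.Set.contains s c)) := by
      apply List.mem_filter.mpr
      refine ⟨hu3, ?_⟩
      simp only [Bool.not_eq_eq_eq_not, Bool.not_true]
      by_contra hc
      exact hu2 ((PySem.Set.contains_iff _ _).mp (Bool.of_not_eq_false hc))
    rw [← heqlist] at humem
    have := (List.mem_filter.mp humem).2
    rw [(PySem.Set.contains_iff _ _).mpr hu1] at this
    simp at this

theorem pvLoop_closed (f : Nat) (s : PySem.Set String) (h : pvMiss s < f) :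
    pvClosedS (pvLoop f s) := by
  induction f generalizing s with
  | zero => omega
  | succ f ih =>
    simp only [pvLoop]
    split
    · rename_i hc
      exact ih _ (by have := pvMiss_lt s hc; omega)
    · rename_i hc
      have hfalse : (pvPass s).2 = false := Bool.of_not_eq_true hc
      obtain ⟨e1, e2⟩ := pvPass_false s hfalse
      rw [e1]
      exact e2

-- ---- completeness: any prereq-closed set containing t contains pvAncOf t ----
theorem pvSub_A1 (S : List String) (_ : pvClosedS S) (h : "A1" ∈ S) :
    ∀ x ∈ pvAncOf "A1", x ∈ S := by
  have key : ∀ x ∈ pvAncOf "A1", x = "A1" := by decide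
  intro x hx; rw [key x hx]; exact h

theorem pvSub_A2 (S : List String) (hC : pvClosedS S) (h : "A2" ∈ S) :
    ∀ x ∈ pvAncOf "A2", x ∈ S := by
  have p1 : "A1" ∈ S := hC _ h _ (by decide)
  have s1 := pvSub_A1 S hC p1
  have key : ∀ x ∈ pvAncOf "A2", x = "A2" ∨ x ∈ pvAncOf "A1" := by decide
  intro x hx
  rcases key x hx with h' | h'
  · exact h' ▸ h
  · exact s1 x h'

theorem pvSub_A3 (S : List String) (hC : pvClosedS S) (h : "A3" ∈ S) :
    ∀ x ∈ pvAncOf "A3", x ∈ S := by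
  have p1 : "A1" ∈ S := hC _ h _ (by decide)
  have p2 : "A2" ∈ S := hC _ h _ (by decide)
  have s1 := pvSub_A1 S hC p1
  have s2 := pvSub_A2 S hC p2
  have key : ∀ x ∈ pvAncOf "A3", x = "A3" ∨ x ∈ pvAncOf "A1" ∨ x ∈ pvAncOf "A2" := by decide
  intro x hx
  rcases key x hx with h' | h' | h'
  · exact h' ▸ h
  · exact s1 x h'
  · exact s2 x h'

theorem pvSub_B1 (S : List String) (hC : pvClosedS S) (h : "B1" ∈ S) :
    ∀ x ∈ pvAncOf "B1", x ∈ S := by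
  have p1 : "A1" ∈ S := hC _ h _ (by decide)
  have s1 := pvSub_A1 S hC p1
  have key : ∀ x ∈ pvAncOf "B1", x = "B1" ∨ x ∈ pvAncOf "A1" := by decide
  intro x hx
  rcases key x hx with h' | h'
  · exact h' ▸ h
  · exact s1 x h'

theorem pvSub_B2 (S : List String) (hC : pvClosedS S) (h : "B2" ∈ S) :
    ∀ x ∈ pvAncOf "B2", x ∈ S := by
  have p1 : "A2" ∈ S := hC _ h _ (by decide)
  have p2 : "B1" ∈ S := hC _ h _ (by decide)
  have s1 := pvSub_A2 S hC p1
  have s2 := pvSub_B1 S hC p2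
  have key : ∀ x ∈ pvAncOf "B2", x = "B2" ∨ x ∈ pvAncOf "A2" ∨ x ∈ pvAncOf "B1" := by decide
  intro x hx
  rcases key x hx with h' | h' | h'
  · exact h' ▸ h
  · exact s1 x h'
  · exact s2 x h'

theorem pvSub_B3 (S : List String) (hC : pvClosedS S) (h : "B3" ∈ S) :
    ∀ x ∈ pvAncOf "B3", x ∈ S := by
  have p1 : "A3" ∈ S := hC _ h _ (by decide)
  have p2 : "B2" ∈ S := hC _ h _ (by decide)
  have s1 := pvSub_A3 S hC p1
  have s2 := pvSub_B2 S hC p2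
  have key : ∀ x ∈ pvAncOf "B3", x = "B3" ∨ x ∈ pvAncOf "A3" ∨ x ∈ pvAncOf "B2" := by decide
  intro x hx
  rcases key x hx with h' | h' | h'
  · exact h' ▸ h
  · exact s1 x h'
  · exact s2 x h'

theorem pvSub_C1 (S : List String) (hC : pvClosedS S) (h : "C1" ∈ S) :
    ∀ x ∈ pvAncOf "C1", x ∈ S := by
  have p1 : "B1" ∈ S := hC _ h _ (by decide)
  have p2 : "B2" ∈ S := hC _ h _ (by decide)
  have s1 := pvSub_B1 S hC p1
  have s2 := pvSub_B2 S hC p2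
  have key : ∀ x ∈ pvAncOf "C1", x = "C1" ∨ x ∈ pvAncOf "B1" ∨ x ∈ pvAncOf "B2" := by decide
  intro x hx
  rcases key x hx with h' | h' | h'
  · exact h' ▸ h
  · exact s1 x h'
  · exact s2 x h'

theorem pvSub_C2 (S : List String) (hC : pvClosedS S) (h : "C2" ∈ S) :
    ∀ x ∈ pvAncOf "C2", x ∈ S := by
  have p1 : "C1" ∈ S := hC _ h _ (by decide)
  have p2 : "B2" ∈ S := hC _ h _ (by decide)
  have s1 := pvSub_C1 S hC p1
  have s2 := pvSub_B2 S hC p2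
  have key : ∀ x ∈ pvAncOf "C2", x = "C2" ∨ x ∈ pvAncOf "C1" ∨ x ∈ pvAncOf "B2" := by decide
  intro x hx
  rcases key x hx with h' | h' | h'
  · exact h' ▸ h
  · exact s1 x h'
  · exact s2 x h'

theorem pvSub_C3 (S : List String) (hC : pvClosedS S) (h : "C3" ∈ S) :
    ∀ x ∈ pvAncOf "C3", x ∈ S := by
  have p1 : "B3" ∈ S := hC _ h _ (by decide)
  have s1 := pvSub_B3 S hC p1
  have key : ∀ x ∈ pvAncOf "C3", x = "C3" ∨ x ∈ pvAncOf "B3" := by decide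
  intro x hx
  rcases key x hx with h' | h'
  · exact h' ▸ h
  · exact s1 x h'

theorem pvSub_D1 (S : List String) (hC : pvClosedS S) (h : "D1" ∈ S) :
    ∀ x ∈ pvAncOf "D1", x ∈ S := by
  have p1 : "C1" ∈ S := hC _ h _ (by decide)
  have p2 : "A1" ∈ S := hC _ h _ (by decide)
  have s1 := pvSub_C1 S hC p1
  have s2 := pvSub_A1 S hC p2
  have key : ∀ x ∈ pvAncOf "D1", x = "D1" ∨ x ∈ pvAncOf "C1" ∨ x ∈ pvAncOf "A1" := by decide
  intro x hx
  rcases key x hx with h' | h' | h'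
  · exact h' ▸ h
  · exact s1 x h'
  · exact s2 x h'

theorem pvSub_D2 (S : List String) (hC : pvClosedS S) (h : "D2" ∈ S) :
    ∀ x ∈ pvAncOf "D2", x ∈ S := by
  have p1 : "C2" ∈ S := hC _ h _ (by decide)
  have p2 : "D1" ∈ S := hC _ h _ (by decide)
  have s1 := pvSub_C2 S hC p1
  have s2 := pvSub_D1 S hC p2
  have key : ∀ x ∈ pvAncOf "D2", x = "D2" ∨ x ∈ pvAncOf "C2" ∨ x ∈ pvAncOf "D1" := by decide
  intro x hx
  rcases key x hx with h' | h' | h'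
  · exact h' ▸ h
  · exact s1 x h'
  · exact s2 x h'

theorem pvSub_D3 (S : List String) (hC : pvClosedS S) (h : "D3" ∈ S) :
    ∀ x ∈ pvAncOf "D3", x ∈ S := by
  have p1 : "D2" ∈ S := hC _ h _ (by decide)
  have p2 : "B3" ∈ S := hC _ h _ (by decide)
  have s1 := pvSub_D2 S hC p1
  have s2 := pvSub_B3 S hC p2
  have key : ∀ x ∈ pvAncOf "D3", x = "D3" ∨ x ∈ pvAncOf "D2" ∨ x ∈ pvAncOf "B3" := by decide
  intro x hx
  rcases key x hx with h' | h' | h'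
  · exact h' ▸ h
  · exact s1 x h'
  · exact s2 x h'

theorem pvSub (t : String) (S : List String) (hC : pvClosedS S) (h : t ∈ S) :
    ∀ x ∈ pvAncOf t, x ∈ S := by
  by_cases hc : t ∈ CELL_ORDER
  · simp [CELL_ORDER] at hc
    rcases hc with e|e|e|e|e|e|e|e|e|e|e|e <;> subst e
    · exact pvSub_A1 S hC h
    · exact pvSub_A2 S hC h
    · exact pvSub_A3 S hC h
    · exact pvSub_B1 S hC h
    · exact pvSub_B2 S hC h
    · exact pvSub_B3 S hC h
    · exact pvSub_C1 S hC h
    · exact pvSub_C2 S hC h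
    · exact pvSub_C3 S hC h
    · exact pvSub_D1 S hC h
    · exact pvSub_D2 S hC h
    · exact pvSub_D3 S hC h
  · rw [pvAncOf_of_not_mem t hc]
    intro x hx
    simp at hx
    exact hx ▸ h

-- ---- B's closed set, by membership ----
theorem pvB_mem (tg : List String) (acc : PySem.Set String) (x : String) :
    x ∈ tg.foldl (fun acc t => PySem.Set.union acc (pvAncOf t)) acc ↔
      x ∈ acc ∨ ∃ t ∈ tg, x ∈ pvAncOf t := by
  induction tg generalizing acc with
  | nil => simp
  | cons t tg ih =>
    simp only [List.foldl_cons, ih, PySem.Set.mem_union]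
    constructor
    · rintro ((h | h) | ⟨t', ht', hx⟩)
      · exact Or.inl h
      · exact Or.inr ⟨t, List.mem_cons_self, h⟩
      · exact Or.inr ⟨t', List.mem_cons_of_mem _ ht', hx⟩
    · rintro (h | ⟨t', ht', hx⟩)
      · exact Or.inl (Or.inl h)
      · rcases List.mem_cons.mp ht' with e | e
        · exact Or.inl (Or.inr (e ▸ hx))
        · exact Or.inr ⟨t', e, hx⟩

-- ---- the two closed sets have the same members ----
theorem pvMain_mem (tg : List String) (x : String) :
    x ∈ pvLoop 13 (PySem.Set.ofList tg) ↔ ∃ t ∈ tg, x ∈ pvAncOf t := by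
  constructor
  · intro hx
    refine pvLoop_sound (fun x => ∃ t ∈ tg, x ∈ pvAncOf t)
      (fun c hc p hp => pvQ_closed tg c hc p hp) 13 _ ?_ x hx
    intro y hy
    exact ⟨y, (PySem.Set.mem_ofList _ _).mp hy, pvAncOf_self y⟩
  · rintro ⟨t, ht, hx⟩
    have hmiss : pvMiss (PySem.Set.ofList tg) < 13 :=
      Nat.lt_of_le_of_lt (List.length_filter_le _ _) (by decide)
    have hclosed := pvLoop_closed 13 (PySem.Set.ofList tg) hmiss
    have htmem : t ∈ pvLoop 13 (PySem.Set.ofList tg) :=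
      pvLoop_mono 13 _ t ((PySem.Set.mem_ofList _ _).mpr ht)
    exact pvSub t _ hclosed htmem x hx

-- ===== VERDICT (by name: the statement is the Claim_ definition above) =====
theorem close_under_prerequisites_spec : Claim_equal_close_under_prerequisites := by
  intro tg _
  unfold Spec_close_under_prerequisites close_under_prerequisites close_under_prerequisites_alt
  apply List.filter_congr
  intro c _
  rw [Bool.eq_iff_iff, PySem.Set.contains_iff, PySem.Set.contains_iff, pvMain_mem]
  rw [pvB_mem]
  simp
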